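-- pv_equiv track=rewrite | github.com/FionaT/DIP_Proj | proj_3/function_enlarge_image/extend_image.py | enlarge_image
-- ===== SOURCE A (Python) =====
-- def enlarge_image(s, origin_image):
-- 	width = len(origin_image)
-- 	height = len(origin_image[0])
-- 	enlarged_width = 2 * s + width
-- 	enlarged_height = 2 * s + height
-- 	enlarged_image = [[255 for i in range(enlarged_height)] for j in range(enlarged_width)]
--
-- 	for x in range(width):
-- 		for y in range(height):
-- 			enlarged_image[x + s][y + s] = origin_image[x][y]
--
-- 	for x in range(width):
-- 		for y in range(s):
-- 			enlarged_image[x + s][y] = origin_image[x][y]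
-- 			enlarged_image[x + s][enlarged_height - y - 1] = origin_image[x][height - y - 1]
--
-- 	for x in range(s):
-- 		for y in range(height):
-- 			enlarged_image[x][y + s] = origin_image[x][y]
-- 			enlarged_image[enlarged_width - x - 1][y + s] = origin_image[width - x - 1][y]
--
-- 	for x in range(s):
-- 		for y in range(s):
-- 			enlarged_image[x][y] = origin_image[x][y]
-- 			enlarged_image[x][enlarged_height - y - 1] = origin_image[x][height - y - 1]
-- 			enlarged_image[enlarged_width - x - 1][y] =  origin_image[width - x - 1][y]
-- 			enlarged_image[enlarged_width - x - 1][enlarged_height - y - 1] = origin_image[width - x - 1][height - y - 1]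
--
-- 	return enlarged_image
-- ===== SOURCE B (Python) =====
-- def enlarge_image(s, origin_image):
--     width = len(origin_image)
--     height = len(origin_image[0])
--     enlarged_width = 2 * s + width
--     enlarged_height = 2 * s + height
--
--     def src(i, n):
--         if i < s:
--             return i
--         if i >= s + n:
--             return i - 2 * s
--         return i - s
--
--     return [[origin_image[src(i, width)][src(j, height)]
--              for j in range(enlarged_height)]
--             for i in range(enlarged_width)]
-- ===== Notes on version B (the rewrite author's own statement) =====
-- stated objective: simpler
-- what changed: Replaces A's 255-fill plus four region-specific border/corner write passes with a single comprehension over all output cells that maps each output coordinate to a source index by one piecewise shift.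
import Mathlib
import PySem

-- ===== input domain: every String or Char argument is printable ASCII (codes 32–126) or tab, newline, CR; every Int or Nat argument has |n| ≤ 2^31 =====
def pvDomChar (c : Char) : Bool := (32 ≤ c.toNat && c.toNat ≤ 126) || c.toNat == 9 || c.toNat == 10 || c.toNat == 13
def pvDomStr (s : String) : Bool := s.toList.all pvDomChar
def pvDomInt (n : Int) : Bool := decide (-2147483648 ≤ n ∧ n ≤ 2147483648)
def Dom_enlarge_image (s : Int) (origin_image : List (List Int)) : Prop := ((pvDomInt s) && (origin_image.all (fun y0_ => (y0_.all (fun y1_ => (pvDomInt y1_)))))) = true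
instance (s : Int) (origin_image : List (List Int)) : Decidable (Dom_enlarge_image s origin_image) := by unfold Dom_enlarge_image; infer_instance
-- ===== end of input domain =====

-- B replaces A's 255-fill plus four region-specific border/corner passes with one pass over all
-- output cells, each mapped to a source cell by a piecewise index shift (objective: simpler).

-- Shared accessor: origin_image[i][j] (exact on Pre_, where every index used is in range;
-- outside Pre_ the Python raises IndexError).
def pvGet2 (g : List (List Int)) (i j : Int) : Int :=
  PySem.List.pyGetD (PySem.List.pyGetD g i []) j 0

-- ===== PORT A =====
-- enlarged_image[i][j] = v (exact on Pre_, where every written index is in range)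
def pvSet2 (g : List (List Int)) (i j : Int) (v : Int) : List (List Int) :=
  PySem.List.pySetD g i (PySem.List.pySetD (PySem.List.pyGetD g i []) j v)

-- enlarged_image = [[255 for i in range(eh)] for j in range(ew)]
def pvInit (s w h : Int) : List (List Int) :=
  (PySem.List.pyRange 0 (2*s + w) 1).map
    (fun _ => (PySem.List.pyRange 0 (2*s + h) 1).map (fun _ => (255 : Int)))

-- first loop of A
def pvLoop1 (s w h : Int) (o g : List (List Int)) : List (List Int) :=
  (PySem.List.pyRange 0 w 1).foldl (fun g x =>
    (PySem.List.pyRange 0 h 1).foldl (fun g y =>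
      pvSet2 g (x + s) (y + s) (pvGet2 o x y)) g) g

-- second loop of A
def pvLoop2 (s w h : Int) (o g : List (List Int)) : List (List Int) :=
  (PySem.List.pyRange 0 w 1).foldl (fun g x =>
    (PySem.List.pyRange 0 s 1).foldl (fun g y =>
      pvSet2 (pvSet2 g (x + s) y (pvGet2 o x y))
        (x + s) (2*s + h - y - 1) (pvGet2 o x (h - y - 1))) g) g

-- third loop of A
def pvLoop3 (s w h : Int) (o g : List (List Int)) : List (List Int) :=
  (PySem.List.pyRange 0 s 1).foldl (fun g x =>
    (PySem.List.pyRange 0 h 1).foldl (fun g y =>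
      pvSet2 (pvSet2 g x (y + s) (pvGet2 o x y))
        (2*s + w - x - 1) (y + s) (pvGet2 o (w - x - 1) y)) g) g

-- fourth loop of A
def pvLoop4 (s w h : Int) (o g : List (List Int)) : List (List Int) :=
  (PySem.List.pyRange 0 s 1).foldl (fun g x =>
    (PySem.List.pyRange 0 s 1).foldl (fun g y =>
      pvSet2 (pvSet2 (pvSet2 (pvSet2 g x y (pvGet2 o x y))
        x (2*s + h - y - 1) (pvGet2 o x (h - y - 1)))
        (2*s + w - x - 1) y (pvGet2 o (w - x - 1) y))
        (2*s + w - x - 1) (2*s + h - y - 1) (pvGet2 o (w - x - 1) (h - y - 1))) g) g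

def enlarge_image (s : Int) (origin_image : List (List Int)) : List (List Int) :=
  let width : Int := origin_image.length
  let height : Int := (PySem.List.pyGetD origin_image 0 []).length
  pvLoop4 s width height origin_image
    (pvLoop3 s width height origin_image
      (pvLoop2 s width height origin_image
        (pvLoop1 s width height origin_image (pvInit s width height))))

-- ===== PORT B =====
-- src(i, n): the piecewise shift of Source B
def pvSrc (s i n : Int) : Int :=
  if i < s then i else if s + n ≤ i then i - 2*s else i - s

def enlarge_image_alt (s : Int) (origin_image : List (List Int)) : List (List Int) :=
  let width : Int := origin_image.length
  let height : Int := (PySem.List.pyGetD origin_image 0 []).length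
  (PySem.List.pyRange 0 (2*s + width) 1).map (fun i =>
    (PySem.List.pyRange 0 (2*s + height) 1).map (fun j =>
      pvGet2 origin_image (pvSrc s i width) (pvSrc s j height)))

-- ===== PRECONDITION & SPEC =====
-- Pre_ is exactly the set of inputs on which the Python A returns normally; everywhere else A
-- raises IndexError, case by case:
--  * origin_image = []: 'len(origin_image[0])' raises at once;
--  * s < 0 with height > 0: loop 1 writes enlarged_image[x+s][...]; at x = width-1 the row index
--    w-1+s is >= the enlarged width 2s+w (and below its negative of it), so it raises even after
--    Python's negative-index wraparound is accounted for;
--  * s > height (row-0 length): loop 2 READS origin_image[0][y] at y = height, a NONNEGATIVE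
--    out-of-range column index on row 0 itself (whose length IS height), so it raises before the
--    negative index h-y-1 in the same statement could ever wrap — longer later rows do not help;
--  * s > width: loop 3 (height > 0 here, since s > height was already excluded and s > width ≥ 0
--    forces s > 0, hence height ≥ s > 0 ... i.e. in the remaining cases height ≥ s) reads
--    origin_image[x][y] at x = width, a nonnegative out-of-range row index;
--  * a later row shorter than row 0: loop 1 reads origin_image[x][y] past that row's end.
--  The one degenerate family that returns is height = 0 with s ≤ 0 (every loop body is empty).
--  All origin_image reads inside Pre_ use indices in [0, width) x [0, height), so no negative
--  index is ever passed to origin_image and pvGet2 is exact.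
def Pre_enlarge_image (s : Int) (origin_image : List (List Int)) : Prop :=
  origin_image ≠ [] ∧
  (((origin_image.headD []).length = 0 ∧ s ≤ 0) ∨
   (0 ≤ s ∧ s ≤ (origin_image.length : Int) ∧
    s ≤ ((origin_image.headD []).length : Int) ∧
    ∀ r ∈ origin_image, (origin_image.headD []).length ≤ r.length))
instance (s : Int) (origin_image : List (List Int)) : Decidable (Pre_enlarge_image s origin_image) := by
  unfold Pre_enlarge_image; infer_instance

def pvWitness_enlarge_image : Int × List (List Int) := (1, [[1, 2], [3, 4]])

def Spec_enlarge_image (s : Int) (origin_image : List (List Int)) (out : List (List Int)) : Prop := out = enlarge_image_alt s origin_image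
instance (s : Int) (origin_image : List (List Int)) (out : List (List Int)) : Decidable (Spec_enlarge_image s origin_image out) := by unfold Spec_enlarge_image; infer_instance

-- ===== CLAIM (what is proved, stated in full; the proofs are below) =====
def Claim_equal_enlarge_image : Prop := ∀ (s : Int) (origin_image : List (List Int)), Dom_enlarge_image s origin_image → Pre_enlarge_image s origin_image → Spec_enlarge_image s origin_image (enlarge_image s origin_image)

-- ===== LEMMAS AND PROOFS =====

-- grid shape: W rows, each of length H
def pvShape (g : List (List Int)) (W H : Int) : Prop :=
  (g.length : Int) = W ∧ ∀ r ∈ g, (r.length : Int) = H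

theorem pvGet2_nonneg (g : List (List Int)) (i j : Int) (hi : 0 ≤ i) (hj : 0 ≤ j) :
    pvGet2 g i j = (g.getD i.toNat []).getD j.toNat 0 := by
  unfold pvGet2
  rw [PySem.List.pyGetD_of_nonneg _ _ hi, PySem.List.pyGetD_of_nonneg _ _ hj]

theorem pvSet2_nonneg (g : List (List Int)) (a b : Int) (v : Int) (ha : 0 ≤ a) (hb : 0 ≤ b) :
    pvSet2 g a b v = g.set a.toNat ((g.getD a.toNat []).set b.toNat v) := by
  unfold pvSet2
  rw [PySem.List.pySetD_of_nonneg _ _ ha, PySem.List.pySetD_of_nonneg _ _ hb,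
    PySem.List.pyGetD_of_nonneg _ _ ha]

theorem pvShape_pvSet2 {g : List (List Int)} {W H a b : Int} (v : Int)
    (hg : pvShape g W H) (ha : 0 ≤ a) (haW : a < W) (hb : 0 ≤ b) :
    pvShape (pvSet2 g a b v) W H := by
  obtain ⟨hlen, hrow⟩ := hg
  rw [pvSet2_nonneg g a b v ha hb]
  have haN : a.toNat < g.length := by omega
  constructor
  · simpa using hlen
  · intro r hr
    rcases List.mem_or_eq_of_mem_set hr with h | h
    · exact hrow r h
    · subst h
      rw [List.length_set, List.getD_eq_getElem _ _ haN]
      exact hrow _ (List.getElem_mem _)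

theorem pvGet2_pvSet2 {g : List (List Int)} {W H : Int} (a b : Int) (v : Int) (i j : Int)
    (hg : pvShape g W H) (ha : 0 ≤ a) (haW : a < W) (hb : 0 ≤ b) (hbH : b < H)
    (hi : 0 ≤ i) (hj : 0 ≤ j) :
    pvGet2 (pvSet2 g a b v) i j = if i = a ∧ j = b then v else pvGet2 g i j := by
  obtain ⟨hlen, hrow⟩ := hg
  have haN : a.toNat < g.length := by omega
  have hrowlen : ((g.getD a.toNat []).length : Int) = H := by
    rw [List.getD_eq_getElem _ _ haN]
    exact hrow _ (List.getElem_mem haN)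
  have hbN : b.toNat < (g.getD a.toNat []).length := by omega
  rw [pvSet2_nonneg g a b v ha hb, pvGet2_nonneg _ _ _ hi hj, pvGet2_nonneg _ _ _ hi hj]
  by_cases hia : i = a
  · subst hia
    have hiN : i.toNat < (g.set i.toNat ((g.getD i.toNat []).set b.toNat v)).length := by
      simpa using haN
    rw [List.getD_eq_getElem _ _ hiN, List.getElem_set_self]
    by_cases hjb : j = b
    · subst hjb
      rw [if_pos ⟨rfl, rfl⟩]
      have hjN : j.toNat < ((g.getD i.toNat []).set j.toNat v).length := by simpa using hbN
      rw [List.getD_eq_getElem _ _ hjN, List.getElem_set_self]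
    · rw [if_neg (by tauto)]
      by_cases hjr : j.toNat < (g.getD i.toNat []).length
      · rw [List.getD_eq_getElem _ _ (by simpa using hjr), List.getElem_set_ne (by omega),
          List.getD_eq_getElem _ _ hjr]
      · rw [List.getD_eq_default _ _ (by rw [List.length_set]; omega),
          List.getD_eq_default _ _ (by omega)]
  · rw [if_neg (by tauto)]
    congr 1
    by_cases hir : i.toNat < g.length
    · rw [List.getD_eq_getElem _ _ (by simpa using hir), List.getElem_set_ne (by omega),
        List.getD_eq_getElem _ _ hir]
    · rw [List.getD_eq_default _ _ (by rw [List.length_set]; omega),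
        List.getD_eq_default _ _ (by omega)]

-- generic fold facts
theorem pvFoldl_inv {γ : Type} (P : List (List Int) → Prop)
    (F : List (List Int) → γ → List (List Int)) :
    ∀ (l : List γ) (g : List (List Int)),
      (∀ g x, x ∈ l → P g → P (F g x)) → P g → P (l.foldl F g) := by
  intro l
  induction l with
  | nil => intro g _ hg; simpa using hg
  | cons a t ih =>
    intro g hstep hg
    exact ih (F g a) (fun g x hx => hstep g x (List.mem_cons_of_mem _ hx))
      (hstep g a (List.mem_cons_self) hg)

theorem pvFoldl_pres {γ : Type} (P : List (List Int) → Prop)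
    (F : List (List Int) → γ → List (List Int)) (i j : Int) :
    ∀ (l : List γ) (g : List (List Int)),
      (∀ g x, x ∈ l → P g → P (F g x)) →
      (∀ g x, x ∈ l → P g → pvGet2 (F g x) i j = pvGet2 g i j) →
      P g → pvGet2 (l.foldl F g) i j = pvGet2 g i j := by
  intro l
  induction l with
  | nil => intro g _ _ _; rfl
  | cons a t ih =>
    intro g hstep hpres hg
    rw [List.foldl_cons,
      ih (F g a) (fun g x hx => hstep g x (List.mem_cons_of_mem _ hx))
        (fun g x hx => hpres g x (List.mem_cons_of_mem _ hx))
        (hstep g a (List.mem_cons_self) hg)]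
    exact hpres g a (List.mem_cons_self) hg

theorem pvFoldl_keep {γ : Type} (P : List (List Int) → Prop)
    (F : List (List Int) → γ → List (List Int)) (i j : Int) (v : Int) :
    ∀ (l : List γ) (g : List (List Int)),
      (∀ g x, x ∈ l → P g → P (F g x)) →
      (∀ g x, x ∈ l → P g → pvGet2 (F g x) i j = v ∨ pvGet2 (F g x) i j = pvGet2 g i j) →
      P g → pvGet2 g i j = v → pvGet2 (l.foldl F g) i j = v := by
  intro l
  induction l with
  | nil => intro g _ _ _ hv; simpa using hv
  | cons a t ih =>
    intro g hstep hor hg hv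
    rw [List.foldl_cons]
    refine ih (F g a) (fun g x hx => hstep g x (List.mem_cons_of_mem _ hx))
      (fun g x hx => hor g x (List.mem_cons_of_mem _ hx))
      (hstep g a (List.mem_cons_self) hg) ?_
    rcases hor g a (List.mem_cons_self) hg with h | h
    · exact h
    · rw [h, hv]

theorem pvFoldl_hit {γ : Type} (P : List (List Int) → Prop) (T : γ → Prop)
    (F : List (List Int) → γ → List (List Int)) (i j : Int) (v : Int) :
    ∀ (l : List γ) (g : List (List Int)),
      (∀ g x, x ∈ l → P g → P (F g x)) →
      (∀ g x, x ∈ l → P g → ¬ T x → pvGet2 (F g x) i j = pvGet2 g i j) →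
      (∀ g x, x ∈ l → P g → T x → pvGet2 (F g x) i j = v) →
      P g → (∃ x ∈ l, T x) → pvGet2 (l.foldl F g) i j = v := by
  intro l
  induction l with
  | nil => intro g _ _ _ _ hex; simp at hex
  | cons a t ih =>
    intro g hstep hmiss hhit hg hex
    rw [List.foldl_cons]
    by_cases hTa : T a
    · refine pvFoldl_keep P F i j v t (F g a)
        (fun g x hx => hstep g x (List.mem_cons_of_mem _ hx)) ?_
        (hstep g a (List.mem_cons_self) hg)
        (hhit g a (List.mem_cons_self) hg hTa)
      intro g x hx hgx
      by_cases hTx : T x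
      · exact Or.inl (hhit g x (List.mem_cons_of_mem _ hx) hgx hTx)
      · exact Or.inr (hmiss g x (List.mem_cons_of_mem _ hx) hgx hTx)
    · have hex' : ∃ x ∈ t, T x := by
        rcases hex with ⟨x, hx, hTx⟩
        rcases List.mem_cons.mp hx with rfl | hx
        · exact absurd hTx hTa
        · exact ⟨x, hx, hTx⟩
      exact ih (F g a) (fun g x hx => hstep g x (List.mem_cons_of_mem _ hx))
        (fun g x hx => hmiss g x (List.mem_cons_of_mem _ hx))
        (fun g x hx => hhit g x (List.mem_cons_of_mem _ hx))
        (hstep g a (List.mem_cons_self) hg) hex'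


-- height accessor bridge
theorem pvHeight_eq (o : List (List Int)) : PySem.List.pyGetD o 0 [] = o.headD [] := by
  cases o <;> simp [PySem.List.pyGetD_zero]

theorem pvInit_shape (s w h : Int) (hs : 0 ≤ s) (hw : 0 ≤ w) (hh : 0 ≤ h) :
    pvShape (pvInit s w h) (2*s + w) (2*s + h) := by
  unfold pvInit
  constructor
  · rw [List.length_map, PySem.List.length_pyRange_one]; omega
  · intro r hr
    rcases List.mem_map.mp hr with ⟨x, _, rfl⟩
    rw [List.length_map, PySem.List.length_pyRange_one]; omega

-- ---- loop 1 ----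
theorem pvLoop1_shape (s w h : Int) (o g : List (List Int)) (hs : 0 ≤ s)
    (hg : pvShape g (2*s + w) (2*s + h)) : pvShape (pvLoop1 s w h o g) (2*s + w) (2*s + h) := by
  unfold pvLoop1
  refine pvFoldl_inv (fun g => pvShape g (2*s + w) (2*s + h)) _ _ g ?_ hg
  intro g x hx hgx
  have hxr := PySem.List.mem_pyRange_one.mp hx
  refine pvFoldl_inv (fun g => pvShape g (2*s + w) (2*s + h)) _ _ g ?_ hgx
  intro g y hy hgy
  have hyr := PySem.List.mem_pyRange_one.mp hy
  exact pvShape_pvSet2 _ hgy (by omega) (by omega) (by omega)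

theorem pvLoop1_hit (s w h i j : Int) (o g : List (List Int)) (hs : 0 ≤ s)
    (hg : pvShape g (2*s + w) (2*s + h))
    (hin : s ≤ i ∧ i < s + w ∧ s ≤ j ∧ j < s + h) :
    pvGet2 (pvLoop1 s w h o g) i j = pvGet2 o (i - s) (j - s) := by
  have hi : 0 ≤ i := by omega
  have hj : 0 ≤ j := by omega
  unfold pvLoop1
  refine pvFoldl_hit (fun g => pvShape g (2*s + w) (2*s + h)) (fun x => x = i - s)
    _ i j _ _ g ?_ ?_ ?_ hg ⟨i - s, PySem.List.mem_pyRange_one.mpr (by omega), rfl⟩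
  · intro g x hx hgx
    have hxr := PySem.List.mem_pyRange_one.mp hx
    refine pvFoldl_inv (fun g => pvShape g (2*s + w) (2*s + h)) _ _ g ?_ hgx
    intro g y hy hgy
    have hyr := PySem.List.mem_pyRange_one.mp hy
    exact pvShape_pvSet2 _ hgy (by omega) (by omega) (by omega)
  · intro g x hx hgx hTx
    have hxr := PySem.List.mem_pyRange_one.mp hx
    refine pvFoldl_pres (fun g => pvShape g (2*s + w) (2*s + h)) _ i j _ g ?_ ?_ hgx
    · intro g y hy hgy
      have hyr := PySem.List.mem_pyRange_one.mp hy
      exact pvShape_pvSet2 _ hgy (by omega) (by omega) (by omega)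
    · intro g y hy hgy
      have hyr := PySem.List.mem_pyRange_one.mp hy
      rw [pvGet2_pvSet2 _ _ _ i j hgy (by omega) (by omega) (by omega) (by omega) hi hj,
        if_neg (by omega)]
  · intro g x hx hgx hTx
    have hxr := PySem.List.mem_pyRange_one.mp hx
    refine pvFoldl_hit (fun g => pvShape g (2*s + w) (2*s + h)) (fun y => y = j - s)
      _ i j _ _ g ?_ ?_ ?_ hgx ⟨j - s, PySem.List.mem_pyRange_one.mpr (by omega), rfl⟩
    · intro g y hy hgy
      have hyr := PySem.List.mem_pyRange_one.mp hy
      exact pvShape_pvSet2 _ hgy (by omega) (by omega) (by omega)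
    · intro g y hy hgy hTy
      have hyr := PySem.List.mem_pyRange_one.mp hy
      rw [pvGet2_pvSet2 _ _ _ i j hgy (by omega) (by omega) (by omega) (by omega) hi hj,
        if_neg (by omega)]
    · intro g y hy hgy hTy
      have hyr := PySem.List.mem_pyRange_one.mp hy
      rw [pvGet2_pvSet2 _ _ _ i j hgy (by omega) (by omega) (by omega) (by omega) hi hj,
        if_pos ⟨by omega, by omega⟩, hTx, hTy]

-- ---- loop 2 ----
theorem pvLoop2_shape (s w h : Int) (o g : List (List Int)) (hs : 0 ≤ s) (hsh : s ≤ h)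
    (hg : pvShape g (2*s + w) (2*s + h)) : pvShape (pvLoop2 s w h o g) (2*s + w) (2*s + h) := by
  unfold pvLoop2
  refine pvFoldl_inv (fun g => pvShape g (2*s + w) (2*s + h)) _ _ g ?_ hg
  intro g x hx hgx
  have hxr := PySem.List.mem_pyRange_one.mp hx
  refine pvFoldl_inv (fun g => pvShape g (2*s + w) (2*s + h)) _ _ g ?_ hgx
  intro g y hy hgy
  have hyr := PySem.List.mem_pyRange_one.mp hy
  exact pvShape_pvSet2 _ (pvShape_pvSet2 _ hgy (by omega) (by omega) (by omega))
    (by omega) (by omega) (by omega)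

theorem pvLoop2_pres (s w h i j : Int) (o g : List (List Int)) (hs : 0 ≤ s) (hsh : s ≤ h)
    (hg : pvShape g (2*s + w) (2*s + h)) (hi : 0 ≤ i) (hj : 0 ≤ j)
    (hout : ¬(s ≤ i ∧ i < s + w ∧ (j < s ∨ s + h ≤ j))) :
    pvGet2 (pvLoop2 s w h o g) i j = pvGet2 g i j := by
  unfold pvLoop2
  refine pvFoldl_pres (fun g => pvShape g (2*s + w) (2*s + h)) _ i j _ g ?_ ?_ hg
  · intro g x hx hgx
    have hxr := PySem.List.mem_pyRange_one.mp hx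
    refine pvFoldl_inv (fun g => pvShape g (2*s + w) (2*s + h)) _ _ g ?_ hgx
    intro g y hy hgy
    have hyr := PySem.List.mem_pyRange_one.mp hy
    exact pvShape_pvSet2 _ (pvShape_pvSet2 _ hgy (by omega) (by omega) (by omega))
      (by omega) (by omega) (by omega)
  · intro g x hx hgx
    have hxr := PySem.List.mem_pyRange_one.mp hx
    refine pvFoldl_pres (fun g => pvShape g (2*s + w) (2*s + h)) _ i j _ g ?_ ?_ hgx
    · intro g y hy hgy
      have hyr := PySem.List.mem_pyRange_one.mp hy
      exact pvShape_pvSet2 _ (pvShape_pvSet2 _ hgy (by omega) (by omega) (by omega))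
        (by omega) (by omega) (by omega)
    · intro g y hy hgy
      have hyr := PySem.List.mem_pyRange_one.mp hy
      rw [pvGet2_pvSet2 _ _ _ i j
          (pvShape_pvSet2 _ hgy (by omega) (by omega) (by omega))
          (by omega) (by omega) (by omega) (by omega) hi hj,
        if_neg (by omega),
        pvGet2_pvSet2 _ _ _ i j hgy (by omega) (by omega) (by omega) (by omega) hi hj,
        if_neg (by omega)]

theorem pvLoop2_hitL (s w h i j : Int) (o g : List (List Int)) (hs : 0 ≤ s) (hsh : s ≤ h)
    (hg : pvShape g (2*s + w) (2*s + h))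
    (hin : s ≤ i ∧ i < s + w ∧ 0 ≤ j ∧ j < s) :
    pvGet2 (pvLoop2 s w h o g) i j = pvGet2 o (i - s) j := by
  have hi : 0 ≤ i := by omega
  have hj : 0 ≤ j := by omega
  unfold pvLoop2
  refine pvFoldl_hit (fun g => pvShape g (2*s + w) (2*s + h)) (fun x => x = i - s)
    _ i j _ _ g ?_ ?_ ?_ hg ⟨i - s, PySem.List.mem_pyRange_one.mpr (by omega), rfl⟩
  · intro g x hx hgx
    have hxr := PySem.List.mem_pyRange_one.mp hx
    refine pvFoldl_inv (fun g => pvShape g (2*s + w) (2*s + h)) _ _ g ?_ hgx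
    intro g y hy hgy
    have hyr := PySem.List.mem_pyRange_one.mp hy
    exact pvShape_pvSet2 _ (pvShape_pvSet2 _ hgy (by omega) (by omega) (by omega))
      (by omega) (by omega) (by omega)
  · intro g x hx hgx hTx
    have hxr := PySem.List.mem_pyRange_one.mp hx
    refine pvFoldl_pres (fun g => pvShape g (2*s + w) (2*s + h)) _ i j _ g ?_ ?_ hgx
    · intro g y hy hgy
      have hyr := PySem.List.mem_pyRange_one.mp hy
      exact pvShape_pvSet2 _ (pvShape_pvSet2 _ hgy (by omega) (by omega) (by omega))
        (by omega) (by omega) (by omega)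
    · intro g y hy hgy
      have hyr := PySem.List.mem_pyRange_one.mp hy
      rw [pvGet2_pvSet2 _ _ _ i j
          (pvShape_pvSet2 _ hgy (by omega) (by omega) (by omega))
          (by omega) (by omega) (by omega) (by omega) hi hj,
        if_neg (by omega),
        pvGet2_pvSet2 _ _ _ i j hgy (by omega) (by omega) (by omega) (by omega) hi hj,
        if_neg (by omega)]
  · intro g x hx hgx hTx
    have hxr := PySem.List.mem_pyRange_one.mp hx
    refine pvFoldl_hit (fun g => pvShape g (2*s + w) (2*s + h)) (fun y => y = j)
      _ i j _ _ g ?_ ?_ ?_ hgx ⟨j, PySem.List.mem_pyRange_one.mpr (by omega), rfl⟩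
    · intro g y hy hgy
      have hyr := PySem.List.mem_pyRange_one.mp hy
      exact pvShape_pvSet2 _ (pvShape_pvSet2 _ hgy (by omega) (by omega) (by omega))
        (by omega) (by omega) (by omega)
    · intro g y hy hgy hTy
      have hyr := PySem.List.mem_pyRange_one.mp hy
      rw [pvGet2_pvSet2 _ _ _ i j
          (pvShape_pvSet2 _ hgy (by omega) (by omega) (by omega))
          (by omega) (by omega) (by omega) (by omega) hi hj,
        if_neg (by omega),
        pvGet2_pvSet2 _ _ _ i j hgy (by omega) (by omega) (by omega) (by omega) hi hj,
        if_neg (by omega)]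
    · intro g y hy hgy hTy
      have hyr := PySem.List.mem_pyRange_one.mp hy
      rw [pvGet2_pvSet2 _ _ _ i j
          (pvShape_pvSet2 _ hgy (by omega) (by omega) (by omega))
          (by omega) (by omega) (by omega) (by omega) hi hj,
        if_neg (by omega),
        pvGet2_pvSet2 _ _ _ i j hgy (by omega) (by omega) (by omega) (by omega) hi hj,
        if_pos ⟨by omega, by omega⟩, hTx, hTy]

theorem pvLoop2_hitR (s w h i j : Int) (o g : List (List Int)) (hs : 0 ≤ s) (hsh : s ≤ h)
    (hg : pvShape g (2*s + w) (2*s + h))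
    (hin : s ≤ i ∧ i < s + w ∧ s + h ≤ j ∧ j < 2*s + h) :
    pvGet2 (pvLoop2 s w h o g) i j = pvGet2 o (i - s) (j - 2*s) := by
  have hi : 0 ≤ i := by omega
  have hj : 0 ≤ j := by omega
  unfold pvLoop2
  refine pvFoldl_hit (fun g => pvShape g (2*s + w) (2*s + h)) (fun x => x = i - s)
    _ i j _ _ g ?_ ?_ ?_ hg ⟨i - s, PySem.List.mem_pyRange_one.mpr (by omega), rfl⟩
  · intro g x hx hgx
    have hxr := PySem.List.mem_pyRange_one.mp hx
    refine pvFoldl_inv (fun g => pvShape g (2*s + w) (2*s + h)) _ _ g ?_ hgx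
    intro g y hy hgy
    have hyr := PySem.List.mem_pyRange_one.mp hy
    exact pvShape_pvSet2 _ (pvShape_pvSet2 _ hgy (by omega) (by omega) (by omega))
      (by omega) (by omega) (by omega)
  · intro g x hx hgx hTx
    have hxr := PySem.List.mem_pyRange_one.mp hx
    refine pvFoldl_pres (fun g => pvShape g (2*s + w) (2*s + h)) _ i j _ g ?_ ?_ hgx
    · intro g y hy hgy
      have hyr := PySem.List.mem_pyRange_one.mp hy
      exact pvShape_pvSet2 _ (pvShape_pvSet2 _ hgy (by omega) (by omega) (by omega))
        (by omega) (by omega) (by omega)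
    · intro g y hy hgy
      have hyr := PySem.List.mem_pyRange_one.mp hy
      rw [pvGet2_pvSet2 _ _ _ i j
          (pvShape_pvSet2 _ hgy (by omega) (by omega) (by omega))
          (by omega) (by omega) (by omega) (by omega) hi hj,
        if_neg (by omega),
        pvGet2_pvSet2 _ _ _ i j hgy (by omega) (by omega) (by omega) (by omega) hi hj,
        if_neg (by omega)]
  · intro g x hx hgx hTx
    have hxr := PySem.List.mem_pyRange_one.mp hx
    refine pvFoldl_hit (fun g => pvShape g (2*s + w) (2*s + h)) (fun y => y = 2*s + h - j - 1)
      _ i j _ _ g ?_ ?_ ?_ hgx ⟨2*s + h - j - 1, PySem.List.mem_pyRange_one.mpr (by omega), rfl⟩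
    · intro g y hy hgy
      have hyr := PySem.List.mem_pyRange_one.mp hy
      exact pvShape_pvSet2 _ (pvShape_pvSet2 _ hgy (by omega) (by omega) (by omega))
        (by omega) (by omega) (by omega)
    · intro g y hy hgy hTy
      have hyr := PySem.List.mem_pyRange_one.mp hy
      rw [pvGet2_pvSet2 _ _ _ i j
          (pvShape_pvSet2 _ hgy (by omega) (by omega) (by omega))
          (by omega) (by omega) (by omega) (by omega) hi hj,
        if_neg (by omega),
        pvGet2_pvSet2 _ _ _ i j hgy (by omega) (by omega) (by omega) (by omega) hi hj,
        if_neg (by omega)]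
    · intro g y hy hgy hTy
      have hyr := PySem.List.mem_pyRange_one.mp hy
      rw [pvGet2_pvSet2 _ _ _ i j
          (pvShape_pvSet2 _ hgy (by omega) (by omega) (by omega))
          (by omega) (by omega) (by omega) (by omega) hi hj,
        if_pos ⟨by omega, by omega⟩, hTx]
      congr 1
      omega

-- ---- loop 3 ----
theorem pvLoop3_shape (s w h : Int) (o g : List (List Int)) (hs : 0 ≤ s) (hsw : s ≤ w)
    (hg : pvShape g (2*s + w) (2*s + h)) : pvShape (pvLoop3 s w h o g) (2*s + w) (2*s + h) := by
  unfold pvLoop3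
  refine pvFoldl_inv (fun g => pvShape g (2*s + w) (2*s + h)) _ _ g ?_ hg
  intro g x hx hgx
  have hxr := PySem.List.mem_pyRange_one.mp hx
  refine pvFoldl_inv (fun g => pvShape g (2*s + w) (2*s + h)) _ _ g ?_ hgx
  intro g y hy hgy
  have hyr := PySem.List.mem_pyRange_one.mp hy
  exact pvShape_pvSet2 _ (pvShape_pvSet2 _ hgy (by omega) (by omega) (by omega))
    (by omega) (by omega) (by omega)

theorem pvLoop3_pres (s w h i j : Int) (o g : List (List Int)) (hs : 0 ≤ s) (hsw : s ≤ w)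
    (hg : pvShape g (2*s + w) (2*s + h)) (hi : 0 ≤ i) (hj : 0 ≤ j)
    (hout : ¬((i < s ∨ s + w ≤ i) ∧ s ≤ j ∧ j < s + h)) :
    pvGet2 (pvLoop3 s w h o g) i j = pvGet2 g i j := by
  unfold pvLoop3
  refine pvFoldl_pres (fun g => pvShape g (2*s + w) (2*s + h)) _ i j _ g ?_ ?_ hg
  · intro g x hx hgx
    have hxr := PySem.List.mem_pyRange_one.mp hx
    refine pvFoldl_inv (fun g => pvShape g (2*s + w) (2*s + h)) _ _ g ?_ hgx
    intro g y hy hgy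
    have hyr := PySem.List.mem_pyRange_one.mp hy
    exact pvShape_pvSet2 _ (pvShape_pvSet2 _ hgy (by omega) (by omega) (by omega))
      (by omega) (by omega) (by omega)
  · intro g x hx hgx
    have hxr := PySem.List.mem_pyRange_one.mp hx
    refine pvFoldl_pres (fun g => pvShape g (2*s + w) (2*s + h)) _ i j _ g ?_ ?_ hgx
    · intro g y hy hgy
      have hyr := PySem.List.mem_pyRange_one.mp hy
      exact pvShape_pvSet2 _ (pvShape_pvSet2 _ hgy (by omega) (by omega) (by omega))
        (by omega) (by omega) (by omega)
    · intro g y hy hgy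
      have hyr := PySem.List.mem_pyRange_one.mp hy
      rw [pvGet2_pvSet2 _ _ _ i j
          (pvShape_pvSet2 _ hgy (by omega) (by omega) (by omega))
          (by omega) (by omega) (by omega) (by omega) hi hj,
        if_neg (by omega),
        pvGet2_pvSet2 _ _ _ i j hgy (by omega) (by omega) (by omega) (by omega) hi hj,
        if_neg (by omega)]

theorem pvLoop3_hitL (s w h i j : Int) (o g : List (List Int)) (hs : 0 ≤ s) (hsw : s ≤ w)
    (hg : pvShape g (2*s + w) (2*s + h))
    (hin : 0 ≤ i ∧ i < s ∧ s ≤ j ∧ j < s + h) :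
    pvGet2 (pvLoop3 s w h o g) i j = pvGet2 o i (j - s) := by
  have hi : 0 ≤ i := by omega
  have hj : 0 ≤ j := by omega
  unfold pvLoop3
  refine pvFoldl_hit (fun g => pvShape g (2*s + w) (2*s + h)) (fun x => x = i)
    _ i j _ _ g ?_ ?_ ?_ hg ⟨i, PySem.List.mem_pyRange_one.mpr (by omega), rfl⟩
  · intro g x hx hgx
    have hxr := PySem.List.mem_pyRange_one.mp hx
    refine pvFoldl_inv (fun g => pvShape g (2*s + w) (2*s + h)) _ _ g ?_ hgx
    intro g y hy hgy
    have hyr := PySem.List.mem_pyRange_one.mp hy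
    exact pvShape_pvSet2 _ (pvShape_pvSet2 _ hgy (by omega) (by omega) (by omega))
      (by omega) (by omega) (by omega)
  · intro g x hx hgx hTx
    have hxr := PySem.List.mem_pyRange_one.mp hx
    refine pvFoldl_pres (fun g => pvShape g (2*s + w) (2*s + h)) _ i j _ g ?_ ?_ hgx
    · intro g y hy hgy
      have hyr := PySem.List.mem_pyRange_one.mp hy
      exact pvShape_pvSet2 _ (pvShape_pvSet2 _ hgy (by omega) (by omega) (by omega))
        (by omega) (by omega) (by omega)
    · intro g y hy hgy
      have hyr := PySem.List.mem_pyRange_one.mp hy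
      rw [pvGet2_pvSet2 _ _ _ i j
          (pvShape_pvSet2 _ hgy (by omega) (by omega) (by omega))
          (by omega) (by omega) (by omega) (by omega) hi hj,
        if_neg (by omega),
        pvGet2_pvSet2 _ _ _ i j hgy (by omega) (by omega) (by omega) (by omega) hi hj,
        if_neg (by omega)]
  · intro g x hx hgx hTx
    have hxr := PySem.List.mem_pyRange_one.mp hx
    refine pvFoldl_hit (fun g => pvShape g (2*s + w) (2*s + h)) (fun y => y = j - s)
      _ i j _ _ g ?_ ?_ ?_ hgx ⟨j - s, PySem.List.mem_pyRange_one.mpr (by omega), rfl⟩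
    · intro g y hy hgy
      have hyr := PySem.List.mem_pyRange_one.mp hy
      exact pvShape_pvSet2 _ (pvShape_pvSet2 _ hgy (by omega) (by omega) (by omega))
        (by omega) (by omega) (by omega)
    · intro g y hy hgy hTy
      have hyr := PySem.List.mem_pyRange_one.mp hy
      rw [pvGet2_pvSet2 _ _ _ i j
          (pvShape_pvSet2 _ hgy (by omega) (by omega) (by omega))
          (by omega) (by omega) (by omega) (by omega) hi hj,
        if_neg (by omega),
        pvGet2_pvSet2 _ _ _ i j hgy (by omega) (by omega) (by omega) (by omega) hi hj,
        if_neg (by omega)]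
    · intro g y hy hgy hTy
      have hyr := PySem.List.mem_pyRange_one.mp hy
      rw [pvGet2_pvSet2 _ _ _ i j
          (pvShape_pvSet2 _ hgy (by omega) (by omega) (by omega))
          (by omega) (by omega) (by omega) (by omega) hi hj,
        if_neg (by omega),
        pvGet2_pvSet2 _ _ _ i j hgy (by omega) (by omega) (by omega) (by omega) hi hj,
        if_pos ⟨by omega, by omega⟩, hTx, hTy]

theorem pvLoop3_hitR (s w h i j : Int) (o g : List (List Int)) (hs : 0 ≤ s) (hsw : s ≤ w)
    (hg : pvShape g (2*s + w) (2*s + h))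
    (hin : s + w ≤ i ∧ i < 2*s + w ∧ s ≤ j ∧ j < s + h) :
    pvGet2 (pvLoop3 s w h o g) i j = pvGet2 o (i - 2*s) (j - s) := by
  have hi : 0 ≤ i := by omega
  have hj : 0 ≤ j := by omega
  unfold pvLoop3
  refine pvFoldl_hit (fun g => pvShape g (2*s + w) (2*s + h)) (fun x => x = 2*s + w - i - 1)
    _ i j _ _ g ?_ ?_ ?_ hg ⟨2*s + w - i - 1, PySem.List.mem_pyRange_one.mpr (by omega), rfl⟩
  · intro g x hx hgx
    have hxr := PySem.List.mem_pyRange_one.mp hx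
    refine pvFoldl_inv (fun g => pvShape g (2*s + w) (2*s + h)) _ _ g ?_ hgx
    intro g y hy hgy
    have hyr := PySem.List.mem_pyRange_one.mp hy
    exact pvShape_pvSet2 _ (pvShape_pvSet2 _ hgy (by omega) (by omega) (by omega))
      (by omega) (by omega) (by omega)
  · intro g x hx hgx hTx
    have hxr := PySem.List.mem_pyRange_one.mp hx
    refine pvFoldl_pres (fun g => pvShape g (2*s + w) (2*s + h)) _ i j _ g ?_ ?_ hgx
    · intro g y hy hgy
      have hyr := PySem.List.mem_pyRange_one.mp hy
      exact pvShape_pvSet2 _ (pvShape_pvSet2 _ hgy (by omega) (by omega) (by omega))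
        (by omega) (by omega) (by omega)
    · intro g y hy hgy
      have hyr := PySem.List.mem_pyRange_one.mp hy
      rw [pvGet2_pvSet2 _ _ _ i j
          (pvShape_pvSet2 _ hgy (by omega) (by omega) (by omega))
          (by omega) (by omega) (by omega) (by omega) hi hj,
        if_neg (by omega),
        pvGet2_pvSet2 _ _ _ i j hgy (by omega) (by omega) (by omega) (by omega) hi hj,
        if_neg (by omega)]
  · intro g x hx hgx hTx
    have hxr := PySem.List.mem_pyRange_one.mp hx
    refine pvFoldl_hit (fun g => pvShape g (2*s + w) (2*s + h)) (fun y => y = j - s)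
      _ i j _ _ g ?_ ?_ ?_ hgx ⟨j - s, PySem.List.mem_pyRange_one.mpr (by omega), rfl⟩
    · intro g y hy hgy
      have hyr := PySem.List.mem_pyRange_one.mp hy
      exact pvShape_pvSet2 _ (pvShape_pvSet2 _ hgy (by omega) (by omega) (by omega))
        (by omega) (by omega) (by omega)
    · intro g y hy hgy hTy
      have hyr := PySem.List.mem_pyRange_one.mp hy
      rw [pvGet2_pvSet2 _ _ _ i j
          (pvShape_pvSet2 _ hgy (by omega) (by omega) (by omega))
          (by omega) (by omega) (by omega) (by omega) hi hj,
        if_neg (by omega),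
        pvGet2_pvSet2 _ _ _ i j hgy (by omega) (by omega) (by omega) (by omega) hi hj,
        if_neg (by omega)]
    · intro g y hy hgy hTy
      have hyr := PySem.List.mem_pyRange_one.mp hy
      rw [pvGet2_pvSet2 _ _ _ i j
          (pvShape_pvSet2 _ hgy (by omega) (by omega) (by omega))
          (by omega) (by omega) (by omega) (by omega) hi hj,
        if_pos ⟨by omega, by omega⟩,
        show w - x - 1 = i - 2*s from by omega, hTy]


-- ---- loop 4 ----
theorem pvLoop4_body_get2 (s w h x y i j : Int) (o g : List (List Int))
    (hs : 0 ≤ s) (hsw : s ≤ w) (hsh : s ≤ h)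
    (hg : pvShape g (2*s + w) (2*s + h)) (hx : 0 ≤ x ∧ x < s) (hy : 0 ≤ y ∧ y < s)
    (hi : 0 ≤ i) (hj : 0 ≤ j) :
    pvGet2 (pvSet2 (pvSet2 (pvSet2 (pvSet2 g x y (pvGet2 o x y))
        x (2*s + h - y - 1) (pvGet2 o x (h - y - 1)))
        (2*s + w - x - 1) y (pvGet2 o (w - x - 1) y))
        (2*s + w - x - 1) (2*s + h - y - 1) (pvGet2 o (w - x - 1) (h - y - 1))) i j =
      if i = 2*s + w - x - 1 ∧ j = 2*s + h - y - 1 then pvGet2 o (w - x - 1) (h - y - 1)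
      else if i = 2*s + w - x - 1 ∧ j = y then pvGet2 o (w - x - 1) y
      else if i = x ∧ j = 2*s + h - y - 1 then pvGet2 o x (h - y - 1)
      else if i = x ∧ j = y then pvGet2 o x y
      else pvGet2 g i j := by
  have hg1 : pvShape (pvSet2 g x y (pvGet2 o x y)) (2*s + w) (2*s + h) :=
    pvShape_pvSet2 _ hg (by omega) (by omega) (by omega)
  have hg2 : pvShape (pvSet2 (pvSet2 g x y (pvGet2 o x y))
      x (2*s + h - y - 1) (pvGet2 o x (h - y - 1))) (2*s + w) (2*s + h) :=
    pvShape_pvSet2 _ hg1 (by omega) (by omega) (by omega)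
  have hg3 : pvShape (pvSet2 (pvSet2 (pvSet2 g x y (pvGet2 o x y))
      x (2*s + h - y - 1) (pvGet2 o x (h - y - 1)))
      (2*s + w - x - 1) y (pvGet2 o (w - x - 1) y)) (2*s + w) (2*s + h) :=
    pvShape_pvSet2 _ hg2 (by omega) (by omega) (by omega)
  rw [pvGet2_pvSet2 _ _ _ i j hg3 (by omega) (by omega) (by omega) (by omega) hi hj,
    pvGet2_pvSet2 _ _ _ i j hg2 (by omega) (by omega) (by omega) (by omega) hi hj,
    pvGet2_pvSet2 _ _ _ i j hg1 (by omega) (by omega) (by omega) (by omega) hi hj,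
    pvGet2_pvSet2 _ _ _ i j hg (by omega) (by omega) (by omega) (by omega) hi hj]

theorem pvLoop4_shape (s w h : Int) (o g : List (List Int)) (hs : 0 ≤ s) (hsw : s ≤ w) (hsh : s ≤ h)
    (hg : pvShape g (2*s + w) (2*s + h)) : pvShape (pvLoop4 s w h o g) (2*s + w) (2*s + h) := by
  unfold pvLoop4
  refine pvFoldl_inv (fun g => pvShape g (2*s + w) (2*s + h)) _ _ g ?_ hg
  intro g x hx hgx
  have hxr := PySem.List.mem_pyRange_one.mp hx
  refine pvFoldl_inv (fun g => pvShape g (2*s + w) (2*s + h)) _ _ g ?_ hgx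
  intro g y hy hgy
  have hyr := PySem.List.mem_pyRange_one.mp hy
  exact pvShape_pvSet2 _ (pvShape_pvSet2 _ (pvShape_pvSet2 _ (pvShape_pvSet2 _ hgy
    (by omega) (by omega) (by omega)) (by omega) (by omega) (by omega))
    (by omega) (by omega) (by omega)) (by omega) (by omega) (by omega)

theorem pvLoop4_pres (s w h i j : Int) (o g : List (List Int)) (hs : 0 ≤ s) (hsw : s ≤ w) (hsh : s ≤ h)
    (hg : pvShape g (2*s + w) (2*s + h)) (hi : 0 ≤ i) (hj : 0 ≤ j)
    (hout : ¬((i < s ∨ s + w ≤ i) ∧ (j < s ∨ s + h ≤ j))) :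
    pvGet2 (pvLoop4 s w h o g) i j = pvGet2 g i j := by
  unfold pvLoop4
  refine pvFoldl_pres (fun g => pvShape g (2*s + w) (2*s + h)) _ i j _ g ?_ ?_ hg
  · intro g x hx hgx
    have hxr := PySem.List.mem_pyRange_one.mp hx
    refine pvFoldl_inv (fun g => pvShape g (2*s + w) (2*s + h)) _ _ g ?_ hgx
    intro g y hy hgy
    have hyr := PySem.List.mem_pyRange_one.mp hy
    exact pvShape_pvSet2 _ (pvShape_pvSet2 _ (pvShape_pvSet2 _ (pvShape_pvSet2 _ hgy
      (by omega) (by omega) (by omega)) (by omega) (by omega) (by omega))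
      (by omega) (by omega) (by omega)) (by omega) (by omega) (by omega)
  · intro g x hx hgx
    have hxr := PySem.List.mem_pyRange_one.mp hx
    refine pvFoldl_pres (fun g => pvShape g (2*s + w) (2*s + h)) _ i j _ g ?_ ?_ hgx
    · intro g y hy hgy
      have hyr := PySem.List.mem_pyRange_one.mp hy
      exact pvShape_pvSet2 _ (pvShape_pvSet2 _ (pvShape_pvSet2 _ (pvShape_pvSet2 _ hgy
        (by omega) (by omega) (by omega)) (by omega) (by omega) (by omega))
        (by omega) (by omega) (by omega)) (by omega) (by omega) (by omega)
    · intro g y hy hgy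
      have hyr := PySem.List.mem_pyRange_one.mp hy
      rw [pvLoop4_body_get2 s w h x y i j o g hs hsw hsh hgy
          (by omega) (by omega) hi hj,
        if_neg (by omega), if_neg (by omega), if_neg (by omega), if_neg (by omega)]

theorem pvLoop4_hit (s w h i j : Int) (o g : List (List Int)) (hs : 0 ≤ s) (hsw : s ≤ w) (hsh : s ≤ h)
    (hg : pvShape g (2*s + w) (2*s + h))
    (hi : 0 ≤ i) (hiW : i < 2*s + w) (hj : 0 ≤ j) (hjH : j < 2*s + h)
    (hiS : i < s ∨ s + w ≤ i) (hjS : j < s ∨ s + h ≤ j) :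
    pvGet2 (pvLoop4 s w h o g) i j =
      pvGet2 o (if i < s then i else i - 2*s) (if j < s then j else j - 2*s) := by
  unfold pvLoop4
  refine pvFoldl_hit (fun g => pvShape g (2*s + w) (2*s + h))
    (fun x => x = if i < s then i else 2*s + w - i - 1)
    _ i j _ _ g ?_ ?_ ?_ hg
    ⟨if i < s then i else 2*s + w - i - 1,
      PySem.List.mem_pyRange_one.mpr (by split <;> omega), rfl⟩
  · intro g x hx hgx
    have hxr := PySem.List.mem_pyRange_one.mp hx
    refine pvFoldl_inv (fun g => pvShape g (2*s + w) (2*s + h)) _ _ g ?_ hgx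
    intro g y hy hgy
    have hyr := PySem.List.mem_pyRange_one.mp hy
    exact pvShape_pvSet2 _ (pvShape_pvSet2 _ (pvShape_pvSet2 _ (pvShape_pvSet2 _ hgy
      (by omega) (by omega) (by omega)) (by omega) (by omega) (by omega))
      (by omega) (by omega) (by omega)) (by omega) (by omega) (by omega)
  · intro g x hx hgx hTx
    have hxr := PySem.List.mem_pyRange_one.mp hx
    have hTx' : (i < s → x ≠ i) ∧ (s + w ≤ i → x ≠ 2*s + w - i - 1) := by
      constructor <;> intro hc <;> intro hceq <;> apply hTx <;> simp only [hceq] <;> split <;> omega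
    refine pvFoldl_pres (fun g => pvShape g (2*s + w) (2*s + h)) _ i j _ g ?_ ?_ hgx
    · intro g y hy hgy
      have hyr := PySem.List.mem_pyRange_one.mp hy
      exact pvShape_pvSet2 _ (pvShape_pvSet2 _ (pvShape_pvSet2 _ (pvShape_pvSet2 _ hgy
        (by omega) (by omega) (by omega)) (by omega) (by omega) (by omega))
        (by omega) (by omega) (by omega)) (by omega) (by omega) (by omega)
    · intro g y hy hgy
      have hyr := PySem.List.mem_pyRange_one.mp hy
      rw [pvLoop4_body_get2 s w h x y i j o g hs hsw hsh hgy
          (by omega) (by omega) hi hj,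
        if_neg (by rcases hTx' with ⟨h1, h2⟩; rcases hiS with hc | hc
                   · have := h1 hc; omega
                   · have := h2 hc; omega),
        if_neg (by rcases hTx' with ⟨h1, h2⟩; rcases hiS with hc | hc
                   · have := h1 hc; omega
                   · have := h2 hc; omega),
        if_neg (by rcases hTx' with ⟨h1, h2⟩; rcases hiS with hc | hc
                   · have := h1 hc; omega
                   · have := h2 hc; omega),
        if_neg (by rcases hTx' with ⟨h1, h2⟩; rcases hiS with hc | hc
                   · have := h1 hc; omega
                   · have := h2 hc; omega)]
  · intro g x hx hgx hTx
    have hxr := PySem.List.mem_pyRange_one.mp hx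
    refine pvFoldl_hit (fun g => pvShape g (2*s + w) (2*s + h))
      (fun y => y = if j < s then j else 2*s + h - j - 1)
      _ i j _ _ g ?_ ?_ ?_ hgx
      ⟨if j < s then j else 2*s + h - j - 1,
        PySem.List.mem_pyRange_one.mpr (by split <;> omega), rfl⟩
    · intro g y hy hgy
      have hyr := PySem.List.mem_pyRange_one.mp hy
      exact pvShape_pvSet2 _ (pvShape_pvSet2 _ (pvShape_pvSet2 _ (pvShape_pvSet2 _ hgy
        (by omega) (by omega) (by omega)) (by omega) (by omega) (by omega))
        (by omega) (by omega) (by omega)) (by omega) (by omega) (by omega)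
    · intro g y hy hgy hTy
      have hyr := PySem.List.mem_pyRange_one.mp hy
      have hTy' : (j < s → y ≠ j) ∧ (s + h ≤ j → y ≠ 2*s + h - j - 1) := by
        constructor <;> intro hc <;> intro hceq <;> apply hTy <;> simp only [hceq] <;> split <;> omega
      rw [pvLoop4_body_get2 s w h x y i j o g hs hsw hsh hgy
          (by omega) (by omega) hi hj,
        if_neg (by rcases hTy' with ⟨h1, h2⟩; rcases hjS with hc | hc
                   · have := h1 hc; omega
                   · have := h2 hc; omega),
        if_neg (by rcases hTy' with ⟨h1, h2⟩; rcases hjS with hc | hc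
                   · have := h1 hc; omega
                   · have := h2 hc; omega),
        if_neg (by rcases hTy' with ⟨h1, h2⟩; rcases hjS with hc | hc
                   · have := h1 hc; omega
                   · have := h2 hc; omega),
        if_neg (by rcases hTy' with ⟨h1, h2⟩; rcases hjS with hc | hc
                   · have := h1 hc; omega
                   · have := h2 hc; omega)]
    · intro g y hy hgy hTy
      have hyr := PySem.List.mem_pyRange_one.mp hy
      rw [pvLoop4_body_get2 s w h x y i j o g hs hsw hsh hgy
          (by omega) (by omega) hi hj]
      rcases hiS with hiC | hiC <;> rcases hjS with hjC | hjC
      · rw [if_neg (by rw [hTx, if_pos hiC] at *; omega),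
          if_neg (by rw [hTx, if_pos hiC] at *; omega),
          if_neg (by rw [hTy, if_pos hjC] at *; omega),
          if_pos ⟨by rw [hTx, if_pos hiC], by rw [hTy, if_pos hjC]⟩,
          if_pos hiC, if_pos hjC, hTx, hTy, if_pos hiC, if_pos hjC]
      · rw [if_neg (by rw [hTx, if_pos hiC] at *; omega),
          if_neg (by rw [hTx, if_pos hiC] at *; omega),
          if_pos ⟨by rw [hTx, if_pos hiC], by rw [hTy, if_neg (by omega)]; omega⟩,
          if_pos hiC, if_neg (by omega : ¬ j < s), hTx, if_pos hiC,
          show h - y - 1 = j - 2*s from by rw [hTy, if_neg (by omega)]; omega]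
      · rw [if_neg (by rw [hTy, if_pos hjC] at *; omega),
          if_pos ⟨by rw [hTx, if_neg (by omega)]; omega, by rw [hTy, if_pos hjC]⟩,
          if_neg (by omega : ¬ i < s), if_pos hjC,
          show w - x - 1 = i - 2*s from by rw [hTx, if_neg (by omega)]; omega, hTy, if_pos hjC]
      · rw [if_pos ⟨by rw [hTx, if_neg (by omega)]; omega, by rw [hTy, if_neg (by omega)]; omega⟩,
          if_neg (by omega : ¬ i < s), if_neg (by omega : ¬ j < s),
          show w - x - 1 = i - 2*s from by rw [hTx, if_neg (by omega)]; omega,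
          show h - y - 1 = j - 2*s from by rw [hTy, if_neg (by omega)]; omega]


-- ---- assembly ----
theorem pvChain_get2 (s w h i j : Int) (o : List (List Int)) (hs : 0 ≤ s) (hsw : s ≤ w) (hsh : s ≤ h)
    (hi : 0 ≤ i) (hiW : i < 2*s + w) (hj : 0 ≤ j) (hjH : j < 2*s + h) :
    pvGet2 (pvLoop4 s w h o (pvLoop3 s w h o (pvLoop2 s w h o (pvLoop1 s w h o (pvInit s w h))))) i j
      = pvGet2 o (pvSrc s i w) (pvSrc s j h) := by
  have hg0 := pvInit_shape s w h hs (by omega) (by omega)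
  have hg1 := pvLoop1_shape s w h o _ hs hg0
  have hg2 := pvLoop2_shape s w h o _ hs hsh hg1
  have hg3 := pvLoop3_shape s w h o _ hs hsw hg2
  by_cases hiM : s ≤ i ∧ i < s + w
  · by_cases hjM : s ≤ j ∧ j < s + h
    · rw [pvLoop4_pres s w h i j o _ hs hsw hsh hg3 hi hj (by omega),
        pvLoop3_pres s w h i j o _ hs hsw hg2 hi hj (by omega),
        pvLoop2_pres s w h i j o _ hs hsh hg1 hi hj (by omega),
        pvLoop1_hit s w h i j o _ hs hg0 (by omega),
        show pvSrc s i w = i - s from by unfold pvSrc; split_ifs <;> omega,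
        show pvSrc s j h = j - s from by unfold pvSrc; split_ifs <;> omega]
    · by_cases hjL : j < s
      · rw [pvLoop4_pres s w h i j o _ hs hsw hsh hg3 hi hj (by omega),
          pvLoop3_pres s w h i j o _ hs hsw hg2 hi hj (by omega),
          pvLoop2_hitL s w h i j o _ hs hsh hg1 ⟨by omega, by omega, by omega, by omega⟩,
          show pvSrc s i w = i - s from by unfold pvSrc; split_ifs <;> omega,
          show pvSrc s j h = j from by unfold pvSrc; split_ifs <;> omega]
      · rw [pvLoop4_pres s w h i j o _ hs hsw hsh hg3 hi hj (by omega),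
          pvLoop3_pres s w h i j o _ hs hsw hg2 hi hj (by omega),
          pvLoop2_hitR s w h i j o _ hs hsh hg1 ⟨by omega, by omega, by omega, by omega⟩,
          show pvSrc s i w = i - s from by unfold pvSrc; split_ifs <;> omega,
          show pvSrc s j h = j - 2*s from by unfold pvSrc; split_ifs <;> omega]
  · by_cases hjM : s ≤ j ∧ j < s + h
    · by_cases hiL : i < s
      · rw [pvLoop4_pres s w h i j o _ hs hsw hsh hg3 hi hj (by omega),
          pvLoop3_hitL s w h i j o _ hs hsw hg2 ⟨by omega, by omega, by omega, by omega⟩,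
          show pvSrc s i w = i from by unfold pvSrc; split_ifs <;> omega,
          show pvSrc s j h = j - s from by unfold pvSrc; split_ifs <;> omega]
      · rw [pvLoop4_pres s w h i j o _ hs hsw hsh hg3 hi hj (by omega),
          pvLoop3_hitR s w h i j o _ hs hsw hg2 ⟨by omega, by omega, by omega, by omega⟩,
          show pvSrc s i w = i - 2*s from by unfold pvSrc; split_ifs <;> omega,
          show pvSrc s j h = j - s from by unfold pvSrc; split_ifs <;> omega]
    · rw [pvLoop4_hit s w h i j o _ hs hsw hsh hg3 hi hiW hj hjH (by omega) (by omega),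
        show (if i < s then i else i - 2*s) = pvSrc s i w from by
          unfold pvSrc; split_ifs <;> omega,
        show (if j < s then j else j - 2*s) = pvSrc s j h from by
          unfold pvSrc; split_ifs <;> omega]

theorem pvMain (s w h : Int) (o : List (List Int)) (hs : 0 ≤ s) (hsw : s ≤ w) (hsh : s ≤ h) :
    pvLoop4 s w h o (pvLoop3 s w h o (pvLoop2 s w h o (pvLoop1 s w h o (pvInit s w h)))) =
      (PySem.List.pyRange 0 (2*s + w) 1).map (fun i =>
        (PySem.List.pyRange 0 (2*s + h) 1).map (fun j =>
          pvGet2 o (pvSrc s i w) (pvSrc s j h))) := by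
  have hg0 := pvInit_shape s w h hs (by omega) (by omega)
  have hg1 := pvLoop1_shape s w h o _ hs hg0
  have hg2 := pvLoop2_shape s w h o _ hs hsh hg1
  have hg3 := pvLoop3_shape s w h o _ hs hsw hg2
  have hg4 := pvLoop4_shape s w h o _ hs hsw hsh hg3
  apply List.ext_getElem
  · rw [List.length_map, PySem.List.length_pyRange_one]
    have := hg4.1
    omega
  · intro n hn1 hn2
    simp only [List.getElem_map, PySem.List.getElem_pyRange_one, zero_add]
    have hrow := hg4.2 _ (List.getElem_mem hn1)
    apply List.ext_getElem
    · rw [List.length_map, PySem.List.length_pyRange_one]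
      omega
    · intro m hm1 hm2
      simp only [List.getElem_map, PySem.List.getElem_pyRange_one, zero_add]
      have hlen := hg4.1
      have hEq : pvGet2
          (pvLoop4 s w h o (pvLoop3 s w h o (pvLoop2 s w h o (pvLoop1 s w h o (pvInit s w h)))))
          (↑n) (↑m) =
          (pvLoop4 s w h o (pvLoop3 s w h o (pvLoop2 s w h o (pvLoop1 s w h o (pvInit s w h)))))[n][m] := by
        rw [pvGet2_nonneg _ _ _ (Int.natCast_nonneg n) (Int.natCast_nonneg m),
          Int.toNat_natCast, Int.toNat_natCast, List.getD_eq_getElem _ _ hn1,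
          List.getD_eq_getElem _ _ hm1]
      rw [← hEq, pvChain_get2 s w h (↑n) (↑m) o hs hsw hsh
        (Int.natCast_nonneg n) (by omega) (Int.natCast_nonneg m) (by omega)]

theorem pvDegenerate (s : Int) (o : List (List Int)) (hne : o ≠ [])
    (hh0 : (o.headD []).length = 0) (hsneg : s ≤ 0) :
    enlarge_image s o = enlarge_image_alt s o := by
  have hH : ((PySem.List.pyGetD o 0 []).length : Int) = 0 := by
    rw [pvHeight_eq, hh0]; rfl
  have e1 : PySem.List.pyRange 0 s 1 = [] := PySem.List.pyRange_one_eq_nil hsneg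
  have e2 : PySem.List.pyRange 0 (0 : Int) 1 = [] := PySem.List.pyRange_one_eq_nil le_rfl
  have e4 : PySem.List.pyRange 0 (2*s) 1 = [] := PySem.List.pyRange_one_eq_nil (by omega)
  unfold enlarge_image enlarge_image_alt pvLoop4 pvLoop3 pvLoop2 pvLoop1 pvInit
  simp [hH, e1, e2, e4]
-- ===== VERDICT (by name: the statement is the Claim_ definition above) =====
theorem enlarge_image_spec : Claim_equal_enlarge_image := by
  intro s o _ hpre
  unfold Spec_enlarge_image
  obtain ⟨hne, hcase⟩ := hpre
  rcases hcase with ⟨hh0, hsneg⟩ | ⟨hs, hsw, hsh, _⟩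
  · exact pvDegenerate s o hne hh0 hsneg
  · show pvLoop4 _ _ _ _ _ = _
    exact pvMain s (o.length : Int) ((PySem.List.pyGetD o 0 []).length : Int) o hs hsw
      (by rw [pvHeight_eq]; exact hsh)
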